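-- pv_equiv track=rewrite | github.com/som-shahlab/trove | preprocessing/notes_to_tsv.py | mimic_preprocessing
-- ===== SOURCE A (Python) =====
-- def mimic_preprocessing(text):
--     """
--
--     :param text:
--     :return:
--     """
--     # remove junk headers that concatenate multiple notes
--     sents = []
--     skip = False
--     for line in text.split('\n'):
--         if line.strip() == '(Over)':
--             skip = True
--         elif line.strip() == '(Cont)':
--             skip = False
--             continue
--         if not skip:
--             sents.append(line)
--     text = '\n'.join(sents)
--
--     return text
-- ===== SOURCE B (Python) =====
-- def mimic_preprocessing(text):
--     # Nested-loop iterator consumption instead of a carried skip flag.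
--     out = []
--     it = iter(text.split('\n'))
--     for line in it:
--         s = line.strip()
--         if s == '(Over)':
--             for inner in it:
--                 if inner.strip() == '(Cont)':
--                     break
--         elif s == '(Cont)':
--             continue
--         else:
--             out.append(line)
--     return '\n'.join(out)
-- ===== Notes on version B (the rewrite author's own statement) =====
-- stated objective: alternative
-- what changed: Replaces A's carried boolean skip-flag state machine by direct iterator consumption: on an open marker line an inner loop consumes lines up to the matching close marker, so no flag is threaded through the main loop.
import Mathlib
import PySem

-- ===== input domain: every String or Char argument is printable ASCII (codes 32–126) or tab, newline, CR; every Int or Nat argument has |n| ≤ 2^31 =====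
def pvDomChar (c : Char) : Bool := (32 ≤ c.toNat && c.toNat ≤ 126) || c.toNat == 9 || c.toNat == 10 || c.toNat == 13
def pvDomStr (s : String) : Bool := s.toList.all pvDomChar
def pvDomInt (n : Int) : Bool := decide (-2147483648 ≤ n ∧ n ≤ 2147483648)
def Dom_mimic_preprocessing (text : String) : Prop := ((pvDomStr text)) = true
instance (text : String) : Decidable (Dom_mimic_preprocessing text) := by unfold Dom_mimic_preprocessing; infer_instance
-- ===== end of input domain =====

-- B replaces A's carried skip-flag with nested-loop iterator consumption; same task, same cost (objective: alternative).

-- ===== PORT A =====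
-- A's loop: a fold carrying (sents, skip); '(Over)' sets skip (and the line is
-- then not appended), '(Cont)' clears skip and continues, otherwise append iff not skip.
def pvAStep (st : List String × Bool) (line : String) : List String × Bool :=
  if PySem.Str.strip line == "(Over)" then (st.1, true)
  else if PySem.Str.strip line == "(Cont)" then (st.1, false)
  else if st.2 then (st.1, st.2) else (st.1 ++ [line], st.2)

def mimic_preprocessing (text : String) : String :=
  let sents := ((((PySem.Str.split? text "\n").getD [])).foldl pvAStep ([], false)).1
  PySem.Str.join "\n" sents

-- ===== PORT B =====
-- consume the iterator up to and including the first '(Cont)' line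
def pvDropCont : List String → List String
  | [] => []
  | l :: rest => if PySem.Str.strip l == "(Cont)" then rest else pvDropCont rest

theorem pvDropCont_len_le (ls : List String) : (pvDropCont ls).length ≤ ls.length := by
  induction ls with
  | nil => simp [pvDropCont]
  | cons l rest ih =>
    simp only [pvDropCont]
    split
    · simp
    · exact Nat.le_trans ih (Nat.le_succ _)

def pvBGo : List String → List String
  | [] => []
  | line :: rest =>
    if PySem.Str.strip line == "(Over)" then pvBGo (pvDropCont rest)
    else if PySem.Str.strip line == "(Cont)" then pvBGo rest
    else line :: pvBGo rest
termination_by ls => ls.length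
decreasing_by
  · exact Nat.lt_succ_of_le (pvDropCont_len_le rest)
  · simp
  · simp

def mimic_preprocessing_alt (text : String) : String :=
  PySem.Str.join "\n" (pvBGo (((PySem.Str.split? text "\n").getD [])))

-- ===== PRECONDITION & SPEC =====
def Spec_mimic_preprocessing (text : String) (out : String) : Prop := out = mimic_preprocessing_alt text
instance (text : String) (out : String) : Decidable (Spec_mimic_preprocessing text out) := by unfold Spec_mimic_preprocessing; infer_instance

-- ===== CLAIM (what is proved, stated in full; the proofs are below) =====
def Claim_equal_mimic_preprocessing : Prop := ∀ (text : String), Dom_mimic_preprocessing text → Spec_mimic_preprocessing text (mimic_preprocessing text)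

-- ===== LEMMAS AND PROOFS =====

-- With skip = true, A's fold behaves as if the lines up to the first '(Cont)' were dropped.
theorem pvA_skip_eq (ls : List String) (acc : List String) :
    (ls.foldl pvAStep (acc, true)).1 = ((pvDropCont ls).foldl pvAStep (acc, false)).1 := by
  induction ls generalizing acc with
  | nil => simp [pvDropCont]
  | cons l rest ih =>
    by_cases hc : PySem.Str.strip l == "(Cont)"
    · have ho : ¬ (PySem.Str.strip l = "(Over)") := by
        rw [eq_of_beq hc]; decide
      simp [pvDropCont, pvAStep, hc, ho]
    · by_cases ho : PySem.Str.strip l == "(Over)"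
      · simp [pvDropCont, pvAStep, hc, ho, ih]
      · simp [pvDropCont, pvAStep, hc, ho, ih]

-- A's fold from skip = false computes acc ++ B's recursion.
theorem pvA_eq_B (ls : List String) (acc : List String) :
    (ls.foldl pvAStep (acc, false)).1 = acc ++ pvBGo ls := by
  induction hn : ls.length using Nat.strong_induction_on generalizing ls acc with
  | _ n ih =>
  match ls with
  | [] => simp [pvBGo]
  | l :: rest =>
    by_cases ho : PySem.Str.strip l == "(Over)"
    · rw [pvBGo]
      simp only [List.foldl_cons, pvAStep, ho, if_pos]
      rw [pvA_skip_eq]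
      rw [ih ((pvDropCont rest).length) (by subst hn; exact Nat.lt_succ_of_le (pvDropCont_len_le rest)) _ _ rfl]
    · by_cases hc : PySem.Str.strip l == "(Cont)"
      · rw [pvBGo]
        simp only [List.foldl_cons, pvAStep, ho, hc]
        simp only [Bool.false_eq_true, if_false, if_pos]
        rw [ih rest.length (by subst hn; simp) _ _ rfl]
      · rw [pvBGo]
        simp only [List.foldl_cons, pvAStep, ho, hc]
        simp only [Bool.false_eq_true, if_false]
        rw [ih rest.length (by subst hn; simp) _ _ rfl]
        simp [List.append_assoc]

-- ===== VERDICT (by name: the statement is the Claim_ definition above) =====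
theorem mimic_preprocessing_spec : Claim_equal_mimic_preprocessing := by
  intro text _
  unfold Spec_mimic_preprocessing mimic_preprocessing mimic_preprocessing_alt
  rw [pvA_eq_B]
  simp
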